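-- pv_equiv track=rewrite | github.com/alex020160/konfig_practice_2 | konfig_2practice.py | _parse_stanzas
-- ===== SOURCE A (Python) =====
-- from typing import Optional, List
--
-- def _parse_stanzas(packages_text: str) -> List[dict]:
--
--     stanzas: List[dict] = []
--     cur: dict = {}
--     last_key: Optional[str] = None
--
--     for line in packages_text.splitlines():
--         if not line.strip():
--             if cur:
--                 stanzas.append(cur)
--                 cur = {}
--                 last_key = None
--             continue
--
--         if line[0].isspace() and last_key:
--             cur[last_key] += "\n" + line.strip()
--             continue
--
--         if ":" in line:
--             key, val = line.split(":", 1)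
--             cur[key.strip()] = val.strip()
--             last_key = key.strip()
--         else:
--             continue
--
--     if cur:
--         stanzas.append(cur)
--     return stanzas
-- ===== SOURCE B (Python) =====
-- from typing import List
--
--
-- def _parse_block(lines: List[str]) -> dict:
--     cur: dict = {}
--     last_key = None
--     for line in lines:
--         if line[0].isspace() and last_key:
--             cur[last_key] += "\n" + line.strip()
--         elif ":" in line:
--             key, val = line.split(":", 1)
--             cur[key.strip()] = val.strip()
--             last_key = key.strip()
--     return cur
--
--
-- def _parse_stanzas(packages_text: str) -> List[dict]:
--     # Pass 1: partition the lines into blocks separated by blank lines.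
--     blocks: List[List[str]] = []
--     block: List[str] = []
--     for line in packages_text.splitlines():
--         if not line.strip():
--             if block:
--                 blocks.append(block)
--                 block = []
--         else:
--             block.append(line)
--     if block:
--         blocks.append(block)
--     # Pass 2: parse each block independently, keeping non-empty dicts.
--     out: List[dict] = []
--     for b in blocks:
--         d = _parse_block(b)
--         if d:
--             out.append(d)
--     return out
-- ===== Notes on version B (the rewrite author's own statement) =====
-- stated objective: simpler
-- what changed: Replaces A's single fold over a three-part state (stanzas, current dict, last_key) by a two-phase decomposition: first partition the lines into blank-separated blocks, then parse each block independently into a dict and keep the non-empty ones.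
import Mathlib
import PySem

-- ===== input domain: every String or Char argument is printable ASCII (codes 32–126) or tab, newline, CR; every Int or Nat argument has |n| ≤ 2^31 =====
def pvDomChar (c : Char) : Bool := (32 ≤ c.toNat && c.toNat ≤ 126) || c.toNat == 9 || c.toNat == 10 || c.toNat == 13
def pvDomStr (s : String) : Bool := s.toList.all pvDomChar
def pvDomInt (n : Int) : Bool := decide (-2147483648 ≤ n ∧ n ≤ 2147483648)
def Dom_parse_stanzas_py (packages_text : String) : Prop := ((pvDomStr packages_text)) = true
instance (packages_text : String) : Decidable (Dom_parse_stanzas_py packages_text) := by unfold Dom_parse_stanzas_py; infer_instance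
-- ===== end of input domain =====

-- B replaces A's single fold over (stanzas, cur, last_key) by a two-phase decomposition:
-- partition into blank-separated blocks, then parse each block independently (simpler; return value only).

-- shared line-level primitives (both Pythons evaluate these same subexpressions)
def pvBlank (line : String) : Bool := PySem.Str.strip line == ""

-- line[0].isspace(); `false` when the line is empty (both programs only reach it on non-blank lines)
def pvIndent (line : String) : Bool :=
  match PySem.Str.pyGet? line 0 with
  | some c => PySem.Chars.isspace c
  | none => false

-- Python truthiness of `last_key` (None and "" are falsy)
def pvTruthy (lk : Option String) : Bool :=
  match lk with
  | some k => k != ""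
  | none => false

-- line.split(":", 1); `none` is unreachable under `":" in line`
def pvSplitColon (line : String) : Option (String × String) :=
  match PySem.Str.splitMax? line ":" 1 with
  | some [k, v] => some (k, v)
  | _ => none

-- ===== PORT A =====
def pvStepA (st : List (List (String × String)) × PySem.Dict String String × Option String)
    (line : String) : List (List (String × String)) × PySem.Dict String String × Option String :=
  let (ss, cur, lk) := st
  if pvBlank line then
    if cur.items.isEmpty then (ss, cur, lk) else (ss ++ [cur.items], PySem.Dict.empty, none)
  else if pvIndent line && pvTruthy lk then
    match lk with
    | some k => (ss, cur.modify k "" (fun v => v ++ "\n" ++ PySem.Str.strip line), lk)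
    | none => (ss, cur, lk)
  else if PySem.Str.isIn ":" line then
    match pvSplitColon line with
    | some (k, v) => (ss, cur.insert (PySem.Str.strip k) (PySem.Str.strip v), some (PySem.Str.strip k))
    | none => (ss, cur, lk)
  else (ss, cur, lk)

def parse_stanzas_py (packages_text : String) : List (List (String × String)) :=
  let st := (PySem.Str.splitlines packages_text).foldl pvStepA ([], PySem.Dict.empty, none)
  if st.2.1.items.isEmpty then st.1 else st.1 ++ [st.2.1.items]

-- ===== PORT B =====
def pvStepLine (st : PySem.Dict String String × Option String) (line : String) :
    PySem.Dict String String × Option String :=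
  let (cur, lk) := st
  if pvIndent line && pvTruthy lk then
    match lk with
    | some k => (cur.modify k "" (fun v => v ++ "\n" ++ PySem.Str.strip line), lk)
    | none => (cur, lk)
  else if PySem.Str.isIn ":" line then
    match pvSplitColon line with
    | some (k, v) => (cur.insert (PySem.Str.strip k) (PySem.Str.strip v), some (PySem.Str.strip k))
    | none => (cur, lk)
  else (cur, lk)

def pvParseBlock (ls : List String) : List (String × String) :=
  (ls.foldl pvStepLine (PySem.Dict.empty, none)).1.items

def pvSplitStep (st : List (List String) × List String) (line : String) :
    List (List String) × List String :=
  let (bs, b) := st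
  if pvBlank line then (if b.isEmpty then (bs, b) else (bs ++ [b], []))
  else (bs, b ++ [line])

def parse_stanzas_py_alt (packages_text : String) : List (List (String × String)) :=
  let st := (PySem.Str.splitlines packages_text).foldl pvSplitStep ([], [])
  let blocks := if st.2.isEmpty then st.1 else st.1 ++ [st.2]
  blocks.foldl (fun out blk => if (pvParseBlock blk).isEmpty then out else out ++ [pvParseBlock blk]) []

-- ===== PRECONDITION & SPEC =====
def Spec_parse_stanzas_py (packages_text : String) (out : List (List (String × String))) : Prop := out = parse_stanzas_py_alt packages_text
instance (packages_text : String) (out : List (List (String × String))) : Decidable (Spec_parse_stanzas_py packages_text out) := by unfold Spec_parse_stanzas_py; infer_instance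

-- ===== CLAIM (what is proved, stated in full; the proofs are below) =====
def Claim_equal_parse_stanzas_py : Prop := ∀ (packages_text : String), Dom_parse_stanzas_py packages_text → Spec_parse_stanzas_py packages_text (parse_stanzas_py packages_text)

-- ===== LEMMAS AND PROOFS =====

-- A's fold-and-flush from an arbitrary state
def pvFinA (ls : List String) (ss : List (List (String × String)))
    (c : PySem.Dict String String) (k : Option String) : List (List (String × String)) :=
  let st := ls.foldl pvStepA (ss, c, k)
  if st.2.1.items.isEmpty then st.1 else st.1 ++ [st.2.1.items]

def pvEmit (out : List (List (String × String))) (bs : List (List String)) :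
    List (List (String × String)) :=
  bs.foldl (fun o blk => if (pvParseBlock blk).isEmpty then o else o ++ [pvParseBlock blk]) out

-- B's whole pipeline from an arbitrary partially-built block
def pvRhs (ls : List String) (out : List (List (String × String))) (b : List String) :
    List (List (String × String)) :=
  let st := ls.foldl pvSplitStep ([], b)
  pvEmit out (st.1 ++ (if st.2.isEmpty then [] else [st.2]))

theorem insert_items_ne_nil (d : PySem.Dict String String) (k v : String) :
    (d.insert k v).items ≠ [] := by
  unfold PySem.Dict.insert
  split_ifs with h
  · intro hnil
    simp only [List.map_eq_nil_iff] at hnil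
    simp [PySem.Dict.contains, hnil] at h
  · simp

theorem modify_items_ne_nil (d : PySem.Dict String String) (k : String) (d0 : String)
    (f : String → String) : (d.modify k d0 f).items ≠ [] := by
  unfold PySem.Dict.modify
  exact insert_items_ne_nil _ _ _

theorem items_nil_eq_empty (d : PySem.Dict String String) (h : d.items = []) :
    d = PySem.Dict.empty := by
  apply PySem.Dict.ext; simp [h, PySem.Dict.empty]

-- every branch of the per-line step either leaves the state alone or makes the dict non-empty
theorem stepLine_cases (st : PySem.Dict String String × Option String) (l : String) :
    (pvStepLine st l).1.items ≠ [] ∨ pvStepLine st l = st := by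
  obtain ⟨cur, lk⟩ := st
  unfold pvStepLine
  dsimp only
  by_cases h1 : (pvIndent l && pvTruthy lk) = true
  · rw [if_pos h1]
    cases lk with
    | none => right; rfl
    | some k => left; exact modify_items_ne_nil _ _ _ _
  · rw [if_neg h1]
    by_cases h2 : PySem.Str.isIn ":" l = true
    · rw [if_pos h2]
      rcases hs : pvSplitColon l with _ | ⟨k, v⟩
      · right; rfl
      · left; exact insert_items_ne_nil _ _ _
    · rw [if_neg h2]; right; rfl

theorem stepLine_inv (st : PySem.Dict String String × Option String) (l : String)
    (h : (st.2).isSome = true → st.1.items ≠ []) :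
    ((pvStepLine st l).2).isSome = true → (pvStepLine st l).1.items ≠ [] := by
  rcases stepLine_cases st l with hne | heq
  · intro _; exact hne
  · rw [heq]; exact h

theorem foldl_inv (b : List String) (st : PySem.Dict String String × Option String)
    (h : (st.2).isSome = true → st.1.items ≠ []) :
    ((b.foldl pvStepLine st).2).isSome = true → (b.foldl pvStepLine st).1.items ≠ [] := by
  induction b generalizing st with
  | nil => exact h
  | cons l rest ih => exact ih _ (stepLine_inv st l h)

theorem block_inv (b : List String) :
    ((b.foldl pvStepLine (PySem.Dict.empty, none)).2).isSome = true →
      (b.foldl pvStepLine (PySem.Dict.empty, none)).1.items ≠ [] := by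
  exact foldl_inv b _ (by simp)

theorem stepA_nonblank (ss : List (List (String × String)))
    (c : PySem.Dict String String) (k : Option String) (l : String) (h : pvBlank l = false) :
    pvStepA (ss, c, k) l = (ss, pvStepLine (c, k) l) := by
  unfold pvStepA pvStepLine
  dsimp only
  rw [if_neg (by simp [h])]
  by_cases h1 : (pvIndent l && pvTruthy k) = true
  · rw [if_pos h1, if_pos h1]
    cases k <;> rfl
  · rw [if_neg h1, if_neg h1]
    by_cases h2 : PySem.Str.isIn ":" l = true
    · rw [if_pos h2, if_pos h2]
      rcases hs : pvSplitColon l with _ | ⟨a, b⟩ <;> rfl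
    · rw [if_neg h2, if_neg h2]

theorem split_shift (ls : List String) (bs : List (List String)) (b : List String) :
    ls.foldl pvSplitStep (bs, b) =
      (bs ++ (ls.foldl pvSplitStep ([], b)).1, (ls.foldl pvSplitStep ([], b)).2) := by
  induction ls generalizing bs b with
  | nil => simp
  | cons l rest ih =>
      simp only [List.foldl_cons]
      by_cases hb : pvBlank l = true
      · by_cases he : b.isEmpty = true
        · simp only [pvSplitStep, hb, he, if_true]
          exact ih bs b
        · simp only [pvSplitStep, hb, he, Bool.false_eq_true, if_true, if_false,
            List.nil_append]
          rw [ih (bs ++ [b]) [], ih [b] []]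
          simp
      · simp only [pvSplitStep, hb, Bool.false_eq_true, if_false]
        exact ih bs (b ++ [l])

theorem pvEmit_append (out : List (List (String × String))) (xs ys : List (List String)) :
    pvEmit out (xs ++ ys) = pvEmit (pvEmit out xs) ys := by
  simp [pvEmit, List.foldl_append]

theorem main_lemma (ls : List String) (out : List (List (String × String))) (b : List String) :
    pvFinA ls out (b.foldl pvStepLine (PySem.Dict.empty, none)).1
      (b.foldl pvStepLine (PySem.Dict.empty, none)).2 = pvRhs ls out b := by
  induction ls generalizing out b with
  | nil =>
      by_cases hbe : b.isEmpty = true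
      · rw [List.isEmpty_iff] at hbe
        subst hbe
        simp [pvFinA, pvRhs, pvEmit, PySem.Dict.empty]
      · simp only [pvFinA, pvRhs, List.foldl_nil, hbe, Bool.false_eq_true, if_false,
          List.nil_append]
        simp [pvEmit, pvParseBlock]
  | cons l rest ih =>
      by_cases hbl : pvBlank l = true
      · -- blank line
        have hstepB : pvSplitStep ([], b) l =
            (if b.isEmpty then ([], b) else ([b], [])) := by
          simp [pvSplitStep, hbl]
        by_cases hbe : b.isEmpty = true
        · rw [List.isEmpty_iff] at hbe
          subst hbe
          simp only [pvFinA, pvRhs, List.foldl_cons, List.foldl_nil] at *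
          have : pvStepA (out, PySem.Dict.empty, none) l = (out, PySem.Dict.empty, none) := by
            simp [pvStepA, hbl, PySem.Dict.empty]
          rw [this]
          have h2 : pvSplitStep ([], ([] : List String)) l = ([], []) := by
            simp [pvSplitStep, hbl]
          rw [h2]
          exact ih out []
        · -- b nonempty: A flushes iff the dict is non-empty
          set st := b.foldl pvStepLine (PySem.Dict.empty, none) with hst
          have hsplit : (rest.foldl pvSplitStep ([b], [])) =
              ([b] ++ (rest.foldl pvSplitStep ([], [])).1,
                (rest.foldl pvSplitStep ([], [])).2) := split_shift rest [b] []
          have hrhs : pvRhs (l :: rest) out b = pvRhs rest (pvEmit out [b]) [] := by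
            simp only [pvRhs, List.foldl_cons, hstepB, hbe, Bool.false_eq_true, if_false]
            rw [hsplit]
            simp only [List.append_assoc]
            rw [pvEmit_append]
          rw [hrhs]
          by_cases hc : st.1.items = []
          · -- dict empty: nothing flushed, no stanza emitted
            have hk : st.2 = none := by
              cases hk2 : st.2 with
              | none => rfl
              | some k =>
                  exfalso
                  exact block_inv b (by rw [← hst, hk2]; rfl) (by rw [← hst]; exact hc)
            have hcE : st.1 = PySem.Dict.empty := items_nil_eq_empty _ hc
            have hA : pvStepA (out, st.1, st.2) l = (out, PySem.Dict.empty, none) := by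
              simp [pvStepA, hbl, hcE, hk, PySem.Dict.empty]
            have hemit : pvEmit out [b] = out := by
              simp [pvEmit, pvParseBlock, ← hst, hc]
            simp only [pvFinA, List.foldl_cons, hA]
            rw [hemit]
            exact ih out []
          · have hA : pvStepA (out, st.1, st.2) l = (out ++ [st.1.items], PySem.Dict.empty, none) := by
              simp [pvStepA, hbl, hc]
            have hemit : pvEmit out [b] = out ++ [st.1.items] := by
              simp [pvEmit, pvParseBlock, ← hst, hc]
            simp only [pvFinA, List.foldl_cons, hA]
            rw [hemit]
            exact ih (out ++ [st.1.items]) []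
      · -- non-blank line: extend the current block
        have hstepB : pvSplitStep ([], b) l = ([], b ++ [l]) := by
          simp [pvSplitStep, hbl]
        have hA : pvStepA (out, (b.foldl pvStepLine (PySem.Dict.empty, none)).1,
            (b.foldl pvStepLine (PySem.Dict.empty, none)).2) l =
            (out, ((b ++ [l]).foldl pvStepLine (PySem.Dict.empty, none)).1,
              ((b ++ [l]).foldl pvStepLine (PySem.Dict.empty, none)).2) := by
          rw [List.foldl_append]
          simp only [List.foldl_cons, List.foldl_nil]
          rw [stepA_nonblank _ _ _ _ (by simpa using hbl)]
        simp only [pvFinA, pvRhs, List.foldl_cons, hstepB, hA]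
        exact ih out (b ++ [l])

-- ===== VERDICT (by name: the statement is the Claim_ definition above) =====
theorem parse_stanzas_py_spec : Claim_equal_parse_stanzas_py := by
  intro t _
  unfold Spec_parse_stanzas_py parse_stanzas_py parse_stanzas_py_alt
  have h := main_lemma (PySem.Str.splitlines t) [] []
  simp only [pvFinA, pvRhs, pvEmit, List.foldl_nil] at h
  by_cases hb : ((PySem.Str.splitlines t).foldl pvSplitStep ([], [])).2.isEmpty = true
  · simpa [hb] using h
  · simpa [hb, List.foldl_append] using h
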